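-- pv_equiv track=rewrite | github.com/xjenny2/genetics-svgs-final | functionsgnomad.py | checkascending
-- ===== SOURCE A (Python) =====
-- def checkascending(listresults):
--     results = []
--     errors = []
--     minimum = 0
--     for result in listresults:
--         if result[0] >= minimum:
--             minimum = result[0]
--             results.append(result)
--         elif result[0] < minimum:
--             errors.append("Error: %d not ascending from %d" % (result[0], minimum))
--     return results, errors
-- ===== SOURCE B (Python) =====
-- def checkascending(listresults):
--     # exclusive prefix max of first coordinates, clamped at 0
--     prefmax = [0]
--     for r in listresults:
--         prefmax.append(max(prefmax[-1], r[0]))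
--     results = [r for r, m in zip(listresults, prefmax) if r[0] >= m]
--     errors = ["Error: %d not ascending from %d" % (r[0], m)
--               for r, m in zip(listresults, prefmax) if r[0] < m]
--     return results, errors
-- ===== Notes on version B (the rewrite author's own statement) =====
-- stated objective: alternative
-- what changed: Replaces the single stateful accept/reject loop (running 'minimum' updated only on accept) with a precomputed clamped prefix-maximum table followed by two stateless comprehensions over zip(listresults, prefmax); correct because a rejected element is strictly below the running maximum and so never changes it.
import Mathlib
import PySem

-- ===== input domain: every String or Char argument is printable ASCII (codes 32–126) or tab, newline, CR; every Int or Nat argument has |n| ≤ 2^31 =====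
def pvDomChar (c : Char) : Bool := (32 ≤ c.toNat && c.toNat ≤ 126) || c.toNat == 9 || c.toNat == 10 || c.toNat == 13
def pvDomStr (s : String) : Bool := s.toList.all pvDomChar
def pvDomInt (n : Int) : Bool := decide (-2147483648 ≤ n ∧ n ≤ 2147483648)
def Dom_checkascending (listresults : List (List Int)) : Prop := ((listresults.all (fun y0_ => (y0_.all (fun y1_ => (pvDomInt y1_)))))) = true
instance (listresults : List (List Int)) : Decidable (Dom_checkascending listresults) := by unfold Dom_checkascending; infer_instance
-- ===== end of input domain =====

-- B replaces A's single stateful accept/reject loop by a precomputed clamped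
-- prefix-maximum table plus two stateless passes (alternative decomposition, same cost).

-- ===== PORT A =====
-- A's single loop over listresults keeping (results, errors, minimum);
-- result[0] is ported as (pyGet? r 0).getD 0 — pyGet? = none is Python's IndexError, excluded by Pre_.
def checkascending (listresults : List (List Int)) : List (List Int) × List String :=
  let s := listresults.foldl
    (fun (st : List (List Int) × List String × Int) result =>
      let r0 := (PySem.List.pyGet? result 0).getD 0
      if r0 ≥ st.2.2 then (st.1 ++ [result], st.2.1, r0)
      else if r0 < st.2.2 then
        (st.1, st.2.1 ++ ["Error: " ++ PySem.Int.toStr r0 ++ " not ascending from " ++ PySem.Int.toStr st.2.2], st.2.2)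
      else st)
    ([], [], 0)
  (s.1, s.2.1)

-- ===== PORT B =====
-- Source B: build prefmax by appending max(prefmax[-1], r[0]), then two comprehensions over zip.
def checkascending_alt (listresults : List (List Int)) : List (List Int) × List String :=
  let prefmax := listresults.foldl
    (fun (acc : List Int) r => acc ++ [max (acc.getLastD 0) ((PySem.List.pyGet? r 0).getD 0)]) [0]
  let pairs := listresults.zip prefmax
  (pairs.filterMap (fun rm =>
      if (PySem.List.pyGet? rm.1 0).getD 0 ≥ rm.2 then some rm.1 else none),
   pairs.filterMap (fun rm =>
      if (PySem.List.pyGet? rm.1 0).getD 0 < rm.2 then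
        some ("Error: " ++ PySem.Int.toStr ((PySem.List.pyGet? rm.1 0).getD 0) ++ " not ascending from " ++ PySem.Int.toStr rm.2)
      else none))

-- ===== PRECONDITION & SPEC =====
-- Pre_ excludes inputs containing an empty inner list, on which Python A raises IndexError at result[0].
def Pre_checkascending (listresults : List (List Int)) : Prop :=
  ∀ r ∈ listresults, r ≠ []
instance (listresults : List (List Int)) : Decidable (Pre_checkascending listresults) := by
  unfold Pre_checkascending; infer_instance

def pvWitness_checkascending : List (List Int) := [[1], [0, 2], [3]]

def Spec_checkascending (listresults : List (List Int)) (out : List (List Int) × List String) : Prop := out = checkascending_alt listresults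
instance (listresults : List (List Int)) (out : List (List Int) × List String) : Decidable (Spec_checkascending listresults out) := by unfold Spec_checkascending; infer_instance

-- ===== CLAIM (what is proved, stated in full; the proofs are below) =====
def Claim_equal_checkascending : Prop := ∀ (listresults : List (List Int)), Dom_checkascending listresults → Pre_checkascending listresults → Spec_checkascending listresults (checkascending listresults)

-- ===== LEMMAS AND PROOFS =====

-- common reference recursion: process from baseline m, carrying max m r0 forward
def goAsc : List (List Int) → Int → List (List Int) × List String
  | [], _ => ([], [])
  | r :: t, m =>
    let r0 := (PySem.List.pyGet? r 0).getD 0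
    let rest := goAsc t (max m r0)
    if r0 ≥ m then (r :: rest.1, rest.2)
    else (rest.1, ("Error: " ++ PySem.Int.toStr r0 ++ " not ascending from " ++ PySem.Int.toStr m) :: rest.2)

-- A's fold from any state: appends goAsc's outputs, final minimum is the running max
theorem foldA_eq (l : List (List Int)) (res : List (List Int)) (errs : List String) (m : Int) :
    l.foldl
      (fun (st : List (List Int) × List String × Int) result =>
        let r0 := (PySem.List.pyGet? result 0).getD 0
        if r0 ≥ st.2.2 then (st.1 ++ [result], st.2.1, r0)
        else if r0 < st.2.2 then
          (st.1, st.2.1 ++ ["Error: " ++ PySem.Int.toStr r0 ++ " not ascending from " ++ PySem.Int.toStr st.2.2], st.2.2)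
        else st)
      (res, errs, m)
    = (res ++ (goAsc l m).1, errs ++ (goAsc l m).2,
       l.foldl (fun a r => max a ((PySem.List.pyGet? r 0).getD 0)) m) := by
  induction l generalizing res errs m with
  | nil => simp [goAsc]
  | cons r t ih =>
    simp only [List.foldl_cons, goAsc]
    by_cases h : (PySem.List.pyGet? r 0).getD 0 ≥ m
    · have hm : max m ((PySem.List.pyGet? r 0).getD 0) = (PySem.List.pyGet? r 0).getD 0 :=
        max_eq_right h
      simp [h, ih, List.append_assoc]
    · have hlt : (PySem.List.pyGet? r 0).getD 0 < m := lt_of_not_ge h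
      have hm : max m ((PySem.List.pyGet? r 0).getD 0) = m := max_eq_left (le_of_lt hlt)
      simp [h, hlt, hm, ih, List.append_assoc]

-- scan characterisation of B's prefmax fold
def scanMax (m : Int) : List (List Int) → List Int
  | [] => [m]
  | r :: t => m :: scanMax (max m ((PySem.List.pyGet? r 0).getD 0)) t

theorem foldB_eq (l : List (List Int)) (acc : List Int) (m : Int) :
    l.foldl
      (fun (acc : List Int) r => acc ++ [max (acc.getLastD 0) ((PySem.List.pyGet? r 0).getD 0)])
      (acc ++ [m])
    = acc ++ scanMax m l := by
  induction l generalizing acc m with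
  | nil => simp [scanMax]
  | cons r t ih =>
    simp only [List.foldl_cons, scanMax]
    rw [List.getLastD_concat, List.append_assoc]
    simpa [List.append_assoc] using ih (acc ++ [m]) (max m ((PySem.List.pyGet? r 0).getD 0))

-- B's two filterMaps over zip with scanMax equal goAsc, componentwise
theorem zip_scan_fst (l : List (List Int)) (m : Int) :
    (l.zip (scanMax m l)).filterMap (fun rm =>
        if (PySem.List.pyGet? rm.1 0).getD 0 ≥ rm.2 then some rm.1 else none)
    = (goAsc l m).1 := by
  induction l generalizing m with
  | nil => simp [scanMax, goAsc]
  | cons r t ih =>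
    by_cases h : (PySem.List.pyGet? r 0).getD 0 ≥ m
    · simp [scanMax, goAsc, h, ih]
    · simp [scanMax, goAsc, h, ih]

theorem zip_scan_snd (l : List (List Int)) (m : Int) :
    (l.zip (scanMax m l)).filterMap (fun rm =>
        if (PySem.List.pyGet? rm.1 0).getD 0 < rm.2 then
          some ("Error: " ++ PySem.Int.toStr ((PySem.List.pyGet? rm.1 0).getD 0) ++ " not ascending from " ++ PySem.Int.toStr rm.2)
        else none)
    = (goAsc l m).2 := by
  induction l generalizing m with
  | nil => simp [scanMax, goAsc]
  | cons r t ih =>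
    by_cases h : (PySem.List.pyGet? r 0).getD 0 ≥ m
    · have hnlt : ¬ (PySem.List.pyGet? r 0).getD 0 < m := not_lt.mpr h
      simp [scanMax, goAsc, h, hnlt, ih]
    · have hlt : (PySem.List.pyGet? r 0).getD 0 < m := lt_of_not_ge h
      simp [scanMax, goAsc, h, hlt, ih]

-- ===== VERDICT (by name: the statement is the Claim_ definition above) =====
theorem checkascending_spec : Claim_equal_checkascending := by
  intro l _ _
  unfold Spec_checkascending checkascending checkascending_alt
  have hA := foldA_eq l [] [] 0
  have hB := foldB_eq l [] 0
  simp only [List.nil_append] at hA hB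
  rw [hA, hB]
  dsimp only
  exact Prod.ext (zip_scan_fst l 0).symm (zip_scan_snd l 0).symm
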